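-- pv_equiv track=rewrite | github.com/Gyusik-Choi/algorithm | programmers/방금그곡/방금그곡.py | solution
-- ===== SOURCE A (Python) =====
-- def solution(m, musicinfos):
--     # A# 을 A 로 바꾸면 안 돼서 소문자로 바꾼다
--     # A# 과 A 는 다른데 A# 을 A 로 바꾸면
--     # A# 과 A 를 구분할 수 없다
--     def remove_sharp(melody):
--         return (melody
--                 .replace("A#", "a")
--                 .replace("C#", "c")
--                 .replace("D#", "d")
--                 .replace("F#", "f")
--                 .replace("G#", "g"))
--
--     def get_music_length(s, e):
--         h1, m1 = list(map(int, s.split(":")))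
--         h2, m2 = list(map(int, e.split(":")))
--         return (h2 * 60 + m2) - (h1 * 60 + m1)
--
--     m = remove_sharp(m)
--     musics = []
--
--     for idx, music in enumerate(musicinfos):
--         start, end, title, score = music.split(",")
--         score = remove_sharp(score)
--         music_length = get_music_length(start, end)
--         score_length = len(score)
--
--         if music_length > score_length:
--             score = score * (music_length // score_length) + score[:music_length % score_length]
--         else:
--             score = score[:music_length]
--
--         if m in score:
--             musics.append([title, music_length, idx])
--
--     if not musics:
--         return "(None)"
--     return sorted(musics, key=lambda x: (-x[1], x[2]))[0][0]
-- ===== SOURCE B (Python) =====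
-- SHARP = [("A#", "a"), ("C#", "c"), ("D#", "d"), ("F#", "f"), ("G#", "g")]
--
--
-- def solution(m, musicinfos):
--     def flatten_sharp(melody):
--         for old, new in SHARP:
--             melody = melody.replace(old, new)
--         return melody
--
--     def to_minutes(t):
--         h, mm = t.split(":")
--         return int(h) * 60 + int(mm)
--
--     query = flatten_sharp(m)
--     best = None  # (title, played length)
--     for info in musicinfos:
--         start, end, title, score = info.split(",")
--         score = flatten_sharp(score)
--         length = to_minutes(end) - to_minutes(start)
--         # repeat the score until it covers the play time, then cut (branchless:
--         # replaces A's quotient/remainder splice and its short-score branch)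
--         played = score
--         while len(played) < length:
--             played += score
--         played = played[:length]
--         if query in played and (best is None or best[1] < length):
--             best = (title, length)
--     return "(None)" if best is None else best[0]
-- ===== Notes on version B (the rewrite author's own statement) =====
-- stated objective: simpler
-- what changed: Single-pass running maximum (strict >, earliest index wins) replaces the collect-all-then-sort-by-(-length,idx) selection, and the melody is rebuilt by one repeat-until-long-enough-then-cut step instead of the quotient/remainder splice with a separate short-score branch.
import Mathlib
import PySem

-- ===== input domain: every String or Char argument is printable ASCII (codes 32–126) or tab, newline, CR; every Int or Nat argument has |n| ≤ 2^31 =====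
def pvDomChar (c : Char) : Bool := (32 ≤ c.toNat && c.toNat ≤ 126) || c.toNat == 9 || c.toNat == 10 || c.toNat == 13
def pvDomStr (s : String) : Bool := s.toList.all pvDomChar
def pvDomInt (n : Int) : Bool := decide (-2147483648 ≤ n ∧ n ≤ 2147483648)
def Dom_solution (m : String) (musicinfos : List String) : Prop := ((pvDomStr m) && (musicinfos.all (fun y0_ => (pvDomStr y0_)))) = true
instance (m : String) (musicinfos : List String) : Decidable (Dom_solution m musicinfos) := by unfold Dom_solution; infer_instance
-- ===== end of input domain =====

-- B replaces collect-then-sort-by-(-length,idx) with a single-pass running maximum and the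
-- quotient/remainder melody splice with one repeat-until-long-enough-then-cut step.

-- ===== PORT A =====
-- melody.replace("A#","a")... chain
def removeSharpA (melody : String) : String :=
  PySem.Str.replace (PySem.Str.replace (PySem.Str.replace (PySem.Str.replace (PySem.Str.replace melody "A#" "a") "C#" "c") "D#" "d") "F#" "f") "G#" "g"

-- h1, m1 = list(map(int, s.split(":"))) …; Python raises on a bad split/parse — those inputs
-- are excluded by Pre_solution, the '.getD' defaults are never reached under it
def getMusicLengthA (s e : String) : Int :=
  let p1 := (PySem.Str.split? s ":").getD []
  let h1 := (PySem.Int.ofStr? (p1.getD 0 "")).getD 0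
  let m1 := (PySem.Int.ofStr? (p1.getD 1 "")).getD 0
  let p2 := (PySem.Str.split? e ":").getD []
  let h2 := (PySem.Int.ofStr? (p2.getD 0 "")).getD 0
  let m2 := (PySem.Int.ofStr? (p2.getD 1 "")).getD 0
  (h2 * 60 + m2) - (h1 * 60 + m1)

-- one iteration of A's loop body (strings handled on their code-point lists; exact)
def stepA (mq : String) (acc : List (String × Int × Int)) (p : Int × String) : List (String × Int × Int) :=
  let parts := (PySem.Str.split? p.2 ",").getD []
  let start := parts.getD 0 ""
  let stop := parts.getD 1 ""
  let title := parts.getD 2 ""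
  let score := (removeSharpA (parts.getD 3 "")).toList
  let ml := getMusicLengthA start stop
  let n : Int := score.length
  let score2 : List Char :=
    if n < ml then
      PySem.List.pyRepeat score (PySem.Int.floordiv ml n) ++ PySem.Chars.slice score none (some (PySem.Int.mod ml n))
    else
      PySem.Chars.slice score none (some ml)
  if PySem.Chars.isIn mq.toList score2 then acc ++ [(title, ml, p.1)] else acc

def solution (m : String) (musicinfos : List String) : String :=
  let mq := removeSharpA m
  let musics := (PySem.List.enumerate musicinfos).foldl (stepA mq) []
  if musics = [] then "(None)"
  else
    match PySem.List.sorted musics (fun x => toLex (-x.2.1, x.2.2)) with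
    | [] => "(None)"
    | x :: _ => x.1

-- ===== PORT B =====
def sharpPairs : List (String × String) := [("A#", "a"), ("C#", "c"), ("D#", "d"), ("F#", "f"), ("G#", "g")]

def flattenSharp (melody : String) : String :=
  sharpPairs.foldl (fun s p => PySem.Str.replace s p.1 p.2) melody

def toMinutes (t : String) : Int :=
  let p := (PySem.Str.split? t ":").getD []
  (PySem.Int.ofStr? (p.getD 0 "")).getD 0 * 60 + (PySem.Int.ofStr? (p.getD 1 "")).getD 0

-- while len(played) < length: played += score   (the 'score ≠ []' guard only makes the
-- recursion total; Python loops forever there, which Pre_solution excludes)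
def extendB (score : List Char) (target : Nat) (acc : List Char) : List Char :=
  if h : acc.length < target ∧ score ≠ [] then extendB score target (acc ++ score) else acc
termination_by target - acc.length
decreasing_by
  have : 1 ≤ score.length := List.length_pos_iff.mpr h.2
  simp only [List.length_append]; omega

def stepB (query : String) (best : Option (String × Int)) (info : String) : Option (String × Int) :=
  let parts := (PySem.Str.split? info ",").getD []
  let start := parts.getD 0 ""
  let stop := parts.getD 1 ""
  let title := parts.getD 2 ""
  let score := (flattenSharp (parts.getD 3 "")).toList
  let length := toMinutes stop - toMinutes start
  let played := PySem.Chars.slice (extendB score length.toNat score) none (some length)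
  if PySem.Chars.isIn query.toList played then
    match best with
    | none => some (title, length)
    | some b => if b.2 < length then some (title, length) else some b
  else best

def solution_alt (m : String) (musicinfos : List String) : String :=
  match musicinfos.foldl (stepB (flattenSharp m)) none with
  | none => "(None)"
  | some b => b.1

-- ===== PRECONDITION & SPEC =====
def timeOk (t : String) : Bool :=
  let p := (PySem.Str.split? t ":").getD []
  p.length = 2 && (PySem.Int.ofStr? (p.getD 0 "")).isSome && (PySem.Int.ofStr? (p.getD 1 "")).isSome

-- each entry splits into exactly 4 fields, both times are 'h:m' with int parts, and the
-- sharp-flattened score is nonempty unless the duration is ≤ 0 — exactly the entries on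
-- which Python A returns (otherwise it raises ValueError or ZeroDivisionError)
def trackOk (music : String) : Bool :=
  let parts := (PySem.Str.split? music ",").getD []
  parts.length = 4 && timeOk (parts.getD 0 "") && timeOk (parts.getD 1 "") &&
    (!(flattenSharp (parts.getD 3 "")).toList.isEmpty || toMinutes (parts.getD 1 "") - toMinutes (parts.getD 0 "") ≤ 0)

def Pre_solution (m : String) (musicinfos : List String) : Prop :=
  ∀ music ∈ musicinfos, trackOk music = true

instance (m : String) (musicinfos : List String) : Decidable (Pre_solution m musicinfos) := by
  unfold Pre_solution; infer_instance

def pvWitness_solution : String × List String := ("ABC", ["12:00,12:14,WORLD,ABCA#EF", "13:00,13:05,HELLO,CDEFGAB"])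

def Spec_solution (m : String) (musicinfos : List String) (out : String) : Prop := out = solution_alt m musicinfos
instance (m : String) (musicinfos : List String) (out : String) : Decidable (Spec_solution m musicinfos out) := by unfold Spec_solution; infer_instance

-- ===== CLAIM (what is proved, stated in full; the proofs are below) =====
def Claim_equal_solution : Prop := ∀ (m : String) (musicinfos : List String), Dom_solution m musicinfos → Pre_solution m musicinfos → Spec_solution m musicinfos (solution m musicinfos)

-- ===== LEMMAS AND PROOFS =====

-- the two remove-sharp helpers are the same chain
theorem flattenSharp_eq (s : String) : flattenSharp s = removeSharpA s := rfl

-- the two duration computations agree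
theorem musicLength_eq (s e : String) : toMinutes e - toMinutes s = getMusicLengthA s e := rfl

-- shared per-item data (proof-only helpers)
def itemTL (info : String) : String × Int :=
  let parts := (PySem.Str.split? info ",").getD []
  (parts.getD 2 "", getMusicLengthA (parts.getD 0 "") (parts.getD 1 ""))

def itemScore (info : String) : List Char :=
  (removeSharpA (((PySem.Str.split? info ",").getD []).getD 3 "")).toList

def itemHit (mq info : String) : Bool :=
  PySem.Chars.isIn mq.toList
    (PySem.Chars.slice (extendB (itemScore info) (itemTL info).2.toNat (itemScore info)) none (some (itemTL info).2))

def powL (s : List Char) (k : Nat) : List Char := (List.replicate k s).flatten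

theorem length_powL (s : List Char) (k : Nat) : (powL s k).length = k * s.length := by
  induction k with
  | zero => simp [powL]
  | succ k ih =>
    simp only [powL, List.replicate_succ, List.flatten_cons, List.length_append] at ih ⊢
    rw [ih, Nat.succ_mul]; omega

theorem powL_succ (s : List Char) (k : Nat) : powL s (k + 1) = powL s k ++ s := by
  simp [powL, List.replicate_succ']

theorem powL_prefix (s : List Char) {j k : Nat} (h : j ≤ k) : powL s j <+: powL s k := by
  induction k with
  | zero => simp_all
  | succ k ih =>
    rcases Nat.lt_or_ge j (k + 1) with hj | hj
    · exact (ih (by omega)).trans (by rw [powL_succ]; exact List.prefix_append _ _)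
    · have : j = k + 1 := by omega
      subst this; exact List.prefix_rfl

theorem take_of_prefix {p l : List Char} (h : p <+: l) {t : Nat} (ht : t ≤ p.length) :
    l.take t = p.take t := by
  obtain ⟨r, rfl⟩ := h
  exact List.take_append_of_le_length ht

theorem extendB_powL (s : List Char) (hs : s ≠ []) (t : Nat) (j : Nat) (hj : 1 ≤ j) :
    ∃ k, extendB s t (powL s j) = powL s k ∧ t ≤ k * s.length := by
  have hslen : 1 ≤ s.length := List.length_pos_iff.mpr hs
  by_cases hcond : (powL s j).length < t
  · have hlen : (powL s (j + 1)).length = (powL s j).length + s.length := by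
      rw [length_powL, length_powL]; ring
    have : t - (powL s (j + 1)).length < t - (powL s j).length := by omega
    obtain ⟨k, hk, hkt⟩ := extendB_powL s hs t (j + 1) (by omega)
    refine ⟨k, ?_, hkt⟩
    rw [extendB, dif_pos ⟨hcond, hs⟩, ← powL_succ, hk]
  · refine ⟨j, ?_, by rw [length_powL] at hcond; omega⟩
    rw [extendB, dif_neg (by tauto)]
termination_by t - (powL s j).length

-- A's spliced melody equals B's repeat-then-cut melody, given the entry is admissible
theorem melody_eq (s : List Char) (ml : Int) (h : s ≠ [] ∨ ml ≤ 0) :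
    (if (s.length : Int) < ml then
      PySem.List.pyRepeat s (PySem.Int.floordiv ml s.length) ++ PySem.Chars.slice s none (some (PySem.Int.mod ml s.length))
    else PySem.Chars.slice s none (some ml))
      = PySem.Chars.slice (extendB s ml.toNat s) none (some ml) := by
  by_cases hlt : (s.length : Int) < ml
  · -- long case: both are take ml of a power of s
    have hs : s ≠ [] := by
      rcases h with h | h
      · exact h
      · exfalso; omega
    have hn : 0 < (s.length : Int) := by
      have := List.length_pos_iff.mpr hs; exact_mod_cast this
    have hml : 0 < ml := lt_trans hn hlt
    set q := PySem.Int.floordiv ml s.length with hq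
    set r := PySem.Int.mod ml s.length with hr
    have hqr : q * s.length + r = ml := PySem.Int.floordiv_mul_add_mod ml s.length
    have hr0 : 0 ≤ r := PySem.Int.mod_nonneg ml hn
    have hrlt : r < s.length := PySem.Int.mod_lt ml hn
    have hq1 : 1 ≤ q := by
      rw [hq, PySem.Int.le_floordiv_iff_mul_le hn]; omega
    have hqn : (q.toNat : Int) = q := Int.toNat_of_nonneg (by omega)
    have hrn : (r.toNat : Int) = r := Int.toNat_of_nonneg hr0
    have hmn : (ml.toNat : Int) = ml := Int.toNat_of_nonneg (le_of_lt hml)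
    have hmlnat : ml.toNat = q.toNat * s.length + r.toNat := by
      have hz : (ml.toNat : Int) = (q.toNat : Int) * (s.length : Int) + (r.toNat : Int) := by
        rw [hqn, hrn, hmn]; exact hqr.symm
      exact_mod_cast hz
    have hrnat : r.toNat < s.length := by omega
    rw [if_pos hlt]
    have hA : PySem.List.pyRepeat s q ++ PySem.Chars.slice s none (some r) =
        (powL s (q.toNat + 1)).take ml.toNat := by
      rw [powL_succ]
      have hrep : PySem.List.pyRepeat s q = powL s q.toNat := rfl
      have hsl : PySem.Chars.slice s none (some r) = s.take r.toNat := by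
        rw [PySem.Chars.slice_eq_listSlice, PySem.List.slice_to s hr0]
      have hlen : (powL s q.toNat).length = q.toNat * s.length := length_powL s q.toNat
      have h1 : List.take ((powL s q.toNat).length + r.toNat) (powL s q.toNat) = powL s q.toNat :=
        List.take_of_length_le (by omega)
      have h2 : (powL s q.toNat).length + r.toNat - (powL s q.toNat).length = r.toNat := by omega
      rw [hrep, hsl, hmlnat, ← hlen, List.take_append, h1, h2]
    obtain ⟨k, hk, hkt⟩ := extendB_powL s hs ml.toNat 1 le_rfl
    have hone : powL s 1 = s := by simp [powL]
    rw [hone] at hk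
    have hB : PySem.Chars.slice (extendB s ml.toNat s) none (some ml) = (powL s k).take ml.toNat := by
      rw [hk, PySem.Chars.slice_eq_listSlice, PySem.List.slice_to _ (le_of_lt hml)]
    rw [hA, hB]
    have hK : ml.toNat ≤ (powL s (q.toNat + 1)).length := by
      rw [length_powL, Nat.succ_mul]; omega
    have hK2 : ml.toNat ≤ (powL s k).length := by rw [length_powL]; exact hkt
    rcases Nat.le_total (q.toNat + 1) k with hle | hle
    · rw [take_of_prefix (powL_prefix s hle) hK]
    · rw [(take_of_prefix (powL_prefix s hle) hK2).symm]
  · -- short case: the while loop never runs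
    rw [if_neg hlt, extendB, dif_neg (by rintro ⟨h1, -⟩; omega)]

-- one loop iteration, rephrased through the shared per-item helpers
theorem stepA_eq (mq : String) (acc : List (String × Int × Int)) (idx : Int) (info : String)
    (h : trackOk info = true) :
    stepA mq acc (idx, info) =
      if itemHit mq info then acc ++ [((itemTL info).1, (itemTL info).2, idx)] else acc := by
  simp only [trackOk, Bool.and_eq_true, Bool.or_eq_true, Bool.not_eq_true',
    List.isEmpty_eq_false_iff, decide_eq_true_eq] at h
  obtain ⟨⟨⟨-, -⟩, -⟩, hsc⟩ := h
  have hcase : itemScore info ≠ [] ∨ (itemTL info).2 ≤ 0 := by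
    rcases hsc with hne | hle
    · left
      simpa only [itemScore, ← flattenSharp_eq] using hne
    · right
      simpa only [itemTL, musicLength_eq] using hle
  have key := melody_eq (itemScore info) (itemTL info).2 hcase
  simp only [itemScore, itemTL] at key
  simp only [stepA, itemHit, itemTL, itemScore]
  rw [key]

def bopt (b : Option (String × Int)) (c : String × Int) : Option (String × Int) :=
  match b with
  | none => some c
  | some bb => if bb.2 < c.2 then some c else some bb

def bstep (b c : String × Int) : String × Int := if b.2 < c.2 then c else b

theorem stepB_eq (mq : String) (best : Option (String × Int)) (info : String) :
    stepB mq best info = if itemHit mq info then bopt best (itemTL info) else best := by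
  simp only [stepB, itemHit, itemTL, itemScore, flattenSharp_eq, musicLength_eq, bopt]

-- A's loop: its result is the matched items decorated with strictly increasing indices
def withIdx (mq : String) : List String → Int → List (String × Int × Int)
  | [], _ => []
  | info :: rest, s =>
    (if itemHit mq info then [((itemTL info).1, (itemTL info).2, s)] else []) ++ withIdx mq rest (s + 1)

theorem foldA_eq (mq : String) (infos : List String) (hpre : ∀ i ∈ infos, trackOk i = true) :
    ∀ (s : Int) (acc : List (String × Int × Int)),
      (PySem.List.enumerate infos s).foldl (stepA mq) acc = acc ++ withIdx mq infos s := by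
  induction infos with
  | nil => intro s acc; simp [withIdx, PySem.List.enumerate_nil]
  | cons info rest ih =>
    intro s acc
    rw [PySem.List.enumerate_cons, List.foldl_cons,
      stepA_eq mq acc s info (hpre info (by simp)),
      ih (fun i hi => hpre i (by simp [hi])) (s + 1), withIdx]
    by_cases h : itemHit mq info <;> simp [h]

theorem withIdx_lb (mq : String) (infos : List String) :
    ∀ s, ∀ x ∈ withIdx mq infos s, s ≤ x.2.2 := by
  induction infos with
  | nil => intro s x hx; simp [withIdx] at hx
  | cons info rest ih =>
    intro s x hx
    simp only [withIdx] at hx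
    rcases List.mem_append.mp hx with hx | hx
    · split at hx
      · rw [List.mem_singleton] at hx; subst hx; simp
      · cases hx
    · have := ih (s + 1) x hx; omega

theorem withIdx_pairwise (mq : String) (infos : List String) :
    ∀ s, (withIdx mq infos s).Pairwise (fun a b => a.2.2 < b.2.2) := by
  induction infos with
  | nil => intro s; simp [withIdx]
  | cons info rest ih =>
    intro s
    simp only [withIdx]
    refine List.pairwise_append.mpr ⟨?_, ih (s + 1), ?_⟩
    · split <;> simp
    · intro a ha b hb
      have hb' := withIdx_lb mq rest (s + 1) b hb
      split at ha
      · rw [List.mem_singleton] at ha; subst ha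
        show s < b.2.2
        omega
      · cases ha

-- B's loop over the same items
theorem foldB_eq (mq : String) (infos : List String) :
    ∀ (s : Int) (best : Option (String × Int)),
      infos.foldl (stepB mq) best =
        ((withIdx mq infos s).map (fun x => (x.1, x.2.1))).foldl bopt best := by
  induction infos with
  | nil => intro s best; simp [withIdx]
  | cons info rest ih =>
    intro s best
    rw [List.foldl_cons, stepB_eq, withIdx]
    by_cases h : itemHit mq info
    · simp only [h, if_true, List.map_append, List.map_cons, List.map_nil,
        List.foldl_append, List.foldl_cons, List.foldl_nil]
      exact ih (s + 1) (bopt best (itemTL info))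
    · simp only [h]
      exact ih (s + 1) best

theorem opt_fold (cs : List (String × Int)) : ∀ p, cs.foldl bopt (some p) = some (cs.foldl bstep p) := by
  induction cs with
  | nil => intro p; simp
  | cons c cs ih =>
    intro p
    rw [List.foldl_cons, List.foldl_cons]
    have : bopt (some p) c = some (bstep p c) := by
      simp only [bopt, bstep]
      split <;> rfl
    rw [this, ih]

-- the running maximum with strict '>' picks the first length-maximal item = the lex-minimal key
theorem bfold_min (t : List (String × Int × Int)) :
    ∀ p : String × Int × Int, (p :: t).Pairwise (fun a b => a.2.2 < b.2.2) →
      ∃ r ∈ p :: t,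
        (t.map (fun x => (x.1, x.2.1))).foldl bstep (p.1, p.2.1) = (r.1, r.2.1) ∧
        ∀ y ∈ p :: t, toLex (-r.2.1, r.2.2) ≤ toLex (-y.2.1, y.2.2) := by
  induction t with
  | nil =>
    intro p _
    refine ⟨p, List.mem_cons_self, rfl, ?_⟩
    intro y hy
    rw [List.mem_singleton.mp hy]
  | cons c t ih =>
    intro p hpw
    rcases List.pairwise_cons.mp hpw with ⟨hp, hct⟩
    rw [List.map_cons, List.foldl_cons]
    by_cases hlen : p.2.1 < c.2.1
    · have hstep : bstep (p.1, p.2.1) (c.1, c.2.1) = (c.1, c.2.1) := by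
        simp only [bstep]; rw [if_pos hlen]
      obtain ⟨r, hrmem, hrfold, hrmin⟩ := ih c hct
      refine ⟨r, List.mem_cons_of_mem p hrmem, by rw [hstep]; exact hrfold, ?_⟩
      intro y hy
      rcases List.mem_cons.mp hy with hy | hy
      · subst hy
        refine le_trans (hrmin c List.mem_cons_self) (le_of_lt ?_)
        rw [Prod.Lex.toLex_lt_toLex]
        left; omega
      · exact hrmin y hy
    · have hstep : bstep (p.1, p.2.1) (c.1, c.2.1) = (p.1, p.2.1) := by
        simp only [bstep]; rw [if_neg hlen]
      have hpt : (p :: t).Pairwise (fun a b => a.2.2 < b.2.2) := by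
        refine List.pairwise_cons.mpr ⟨fun b hb => hp b (List.mem_cons_of_mem c hb), (List.pairwise_cons.mp hct).2⟩
      obtain ⟨r, hrmem, hrfold, hrmin⟩ := ih p hpt
      have hrc : toLex (-r.2.1, r.2.2) ≤ toLex (-c.2.1, c.2.2) := by
        refine le_trans (hrmin p List.mem_cons_self) (le_of_lt ?_)
        rw [Prod.Lex.toLex_lt_toLex]
        have hcp := hp c List.mem_cons_self
        rcases lt_or_eq_of_le (not_lt.mp hlen) with h1 | h1
        · left; omega
        · right; exact ⟨by omega, hcp⟩
      refine ⟨r, ?_, by rw [hstep]; exact hrfold, ?_⟩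
      · rcases List.mem_cons.mp hrmem with hr | hr
        · subst hr; exact List.mem_cons_self
        · exact List.mem_cons_of_mem p (List.mem_cons_of_mem c hr)
      · intro y hy
        rcases List.mem_cons.mp hy with hy | hy
        · rw [hy]; exact hrmin p List.mem_cons_self
        · rcases List.mem_cons.mp hy with hy | hy
          · rw [hy]; exact hrc
          · exact hrmin y (List.mem_cons_of_mem p hy)

theorem eq_of_idx {l : List (String × Int × Int)} (hp : l.Pairwise (fun a b => a.2.2 < b.2.2))
    {x y : String × Int × Int} (hx : x ∈ l) (hy : y ∈ l) (hxy : x.2.2 = y.2.2) : x = y := by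
  induction l with
  | nil => cases hx
  | cons a t ih =>
    rcases List.pairwise_cons.mp hp with ⟨ha, ht⟩
    rcases List.mem_cons.mp hx with hx1 | hx1
    · rcases List.mem_cons.mp hy with hy1 | hy1
      · rw [hx1, hy1]
      · exfalso; subst hx1; have := ha y hy1; omega
    · rcases List.mem_cons.mp hy with hy1 | hy1
      · exfalso; subst hy1; have := ha x hx1; omega
      · exact ih ht hx1 hy1

-- ===== VERDICT (by name: the statement is the Claim_ definition above) =====
theorem solution_spec : Claim_equal_solution := by
  intro m musicinfos _ hpre
  unfold Spec_solution
  simp only [solution, solution_alt]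
  rw [foldA_eq (removeSharpA m) musicinfos hpre 0 [], foldB_eq (flattenSharp m) musicinfos 0 none,
    flattenSharp_eq m]
  cases hcase : withIdx (removeSharpA m) musicinfos 0 with
  | nil => simp
  | cons p t =>
    have hpw : (p :: t).Pairwise (fun a b => a.2.2 < b.2.2) := by
      rw [← hcase]; exact withIdx_pairwise _ _ 0
    obtain ⟨r, hrmem, hrfold, hrmin⟩ := bfold_min t p hpw
    have hne : (p :: t) ≠ [] := by simp
    rw [List.nil_append, if_neg hne]
    cases hsorted : PySem.List.sorted (p :: t) (fun x => toLex (-x.2.1, x.2.2)) with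
    | nil =>
      rw [PySem.List.sorted_eq_nil_iff] at hsorted
      exact absurd hsorted hne
    | cons x xs =>
      have hxmem : x ∈ p :: t :=
        (PySem.List.sorted_perm (p :: t) (fun x => toLex (-x.2.1, x.2.2)) false).subset
          (hsorted ▸ List.mem_cons_self)
      have hxmin := PySem.List.key_head_sorted_le (p :: t) (fun x => toLex (-x.2.1, x.2.2)) hsorted
      have hkey : toLex (-x.2.1, x.2.2) = toLex (-r.2.1, r.2.2) :=
        le_antisymm (hxmin r hrmem) (hrmin x hxmem)
      have hidx : x.2.2 = r.2.2 := by
        simpa using congrArg (fun z => (ofLex z).2) hkey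
      have hxr : x = r := eq_of_idx hpw hxmem hrmem hidx
      rw [List.map_cons, List.foldl_cons]
      show _ = (match ((t.map fun x => (x.1, x.2.1)).foldl bopt (bopt none (p.1, p.2.1))) with
        | none => "(None)" | some b => b.1)
      have hb0 : bopt none (p.1, p.2.1) = some (p.1, p.2.1) := rfl
      rw [hb0, opt_fold, hrfold, hxr]
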